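-- pv_equiv track=rewrite | github.com/risksrobots/stock_clustering | utils/portfolio_metrics.py | find_max_recovery
-- ===== SOURCE A (Python) =====
-- def calc_growth(prices):
--     """
--     Calculates list with growth
--     """
--     growth = []
--     past_p = 0
--     for p in prices:
--         if past_p:
--             growth.append(p - past_p)
--         past_p = p
--     return growth
--
-- def find_max_recovery(prices):
--     """
--     Takes Series with closing prices.
--     Returns the value of maximum recovery
--     period in days and indexes of prices
--     where this recovery period took place.
--     """
--     growth = calc_growth(prices)
--     s = 0
--     left = 0
--     right = 0
--     curr_left = 0
--     max_recovery = 0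
--     for i in range(0, len(growth)):
--         if not s:
--             curr_left = i
--         s += growth[i]
--         if s > 0:
--             s = 0
--             if max_recovery < (i - curr_left):
--                 max_recovery = i - curr_left
--                 left = curr_left
--                 right = i
--
--     return max_recovery, left, right + 1
-- ===== SOURCE B (Python) =====
-- def find_max_recovery(prices):
--     """
--     Takes Series with closing prices.
--     Returns the value of maximum recovery
--     period in days and indexes of prices
--     where this recovery period took place.
--
--     Level-based reformulation: build the cumulative-growth level array C
--     (C[k] = sum of the first k produced differences; a difference is
--     produced only past a nonzero previous price), then jump segment by
--     segment: from each drawdown start L find the first k with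
--     C[k] >= C[L] (the level has recovered); record k-1-L if the level
--     strictly exceeded C[L] and the stretch is the longest so far.
--     """
--     C = [0]
--     cur = 0
--     past = 0
--     for p in prices:
--         if past:
--             cur += p - past
--             C.append(cur)
--         past = p
--     m = len(C) - 1
--     max_recovery = 0
--     left = 0
--     right = 0
--     L = 0
--     while True:
--         k = L + 1
--         while k <= m and C[k] < C[L]:
--             k += 1
--         if k > m:
--             return max_recovery, left, right + 1
--         if C[k] > C[L] and k - 1 - L > max_recovery:
--             max_recovery = k - 1 - L
--             left = L
--             right = k - 1
--         L = k
-- ===== Notes on version B (the rewrite author's own statement) =====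
-- stated objective: alternative
-- what changed: Replaces A's running-sum scan with resets by a level-based algorithm: first build the cumulative-growth level array C, then jump segment by segment, searching from each drawdown start L for the first index k whose level C[k] has recovered to C[L], recording k-1-L when it strictly exceeds it.
import Mathlib
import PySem

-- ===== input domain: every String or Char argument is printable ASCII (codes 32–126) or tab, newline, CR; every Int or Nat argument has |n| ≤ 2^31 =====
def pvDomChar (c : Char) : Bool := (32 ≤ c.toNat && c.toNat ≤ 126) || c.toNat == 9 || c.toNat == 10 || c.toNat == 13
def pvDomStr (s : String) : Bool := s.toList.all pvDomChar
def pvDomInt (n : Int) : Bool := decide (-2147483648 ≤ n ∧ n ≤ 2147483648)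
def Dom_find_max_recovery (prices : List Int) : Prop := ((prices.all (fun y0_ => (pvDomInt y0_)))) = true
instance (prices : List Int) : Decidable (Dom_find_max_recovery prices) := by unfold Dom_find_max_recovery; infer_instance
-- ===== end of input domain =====

-- B replaces A's running-sum scan (reset on recovery) by a level-based algorithm:
-- build the cumulative-growth level array C, then jump segment by segment searching
-- for the first index whose level recovers to the segment start's level.
-- Objective: alternative (same asymptotic cost, different algorithm).

-- ===== PORT A =====
-- calc_growth: append p - past_p when past_p is truthy (nonzero), then remember p
def calc_growth (prices : List Int) : List Int :=
  (prices.foldl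
    (fun (st : List Int × Int) p =>
      (if st.2 ≠ 0 then st.1 ++ [p - st.2] else st.1, p))
    ([], 0)).1

-- loop body of A's 'for i in range(0, len(growth))'; state = (s, left, right, curr_left, max_recovery)
def stepA (st : Int × Int × Int × Int × Int) (i : Int) (gi : Int) : Int × Int × Int × Int × Int :=
  let s := st.1; let left := st.2.1; let right := st.2.2.1
  let curr_left := st.2.2.2.1; let max_recovery := st.2.2.2.2
  let curr_left := if s = 0 then i else curr_left    -- if not s: curr_left = i
  let s := s + gi
  if 0 < s then
    if max_recovery < i - curr_left then (0, curr_left, i, curr_left, i - curr_left)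
    else (0, left, right, curr_left, max_recovery)
  else (s, left, right, curr_left, max_recovery)

def find_max_recovery (prices : List Int) : Int × Int × Int :=
  let growth := calc_growth prices
  let st := (PySem.List.pyRange 0 (growth.length : Int) 1).foldl
    (fun st i => stepA st i (PySem.List.pyGetD growth i 0)) (0, 0, 0, 0, 0)
  (st.2.2.2.2, st.2.1, st.2.2.1 + 1)

-- ===== PORT B =====
-- Source B's first loop: build the level list C (C[k] = sum of first k produced differences)
def buildC (prices : List Int) : List Int :=
  (prices.foldl
    (fun (st : List Int × Int × Int) p =>
      if st.2.2 ≠ 0 then (st.1 ++ [st.2.1 + (p - st.2.2)], st.2.1 + (p - st.2.2), p)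
      else (st.1, st.2.1, p))
    ([0], 0, 0)).1

-- Source B's inner 'while k <= m and C[k] < C[L]: k += 1' (indices are nonnegative, kept as Nat)
def searchB (C : List Int) (cL : Int) (m : Nat) (k : Nat) : Nat :=
  if h : k ≤ m ∧ C.getD k 0 < cL then searchB C cL m (k + 1) else k
termination_by m + 1 - k
decreasing_by omega

-- needed for outerB's termination
theorem searchB_ge (C : List Int) (cL : Int) (m : Nat) : ∀ k, k ≤ searchB C cL m k := by
  intro k
  induction hn : m + 1 - k using Nat.strong_induction_on generalizing k with
  | _ n ih =>
    rw [searchB]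
    split
    · rename_i h
      exact le_trans (Nat.le_succ k) (ih (m + 1 - (k + 1)) (by omega) (k + 1) rfl)
    · exact le_refl k

-- Source B's outer 'while True' loop over segment starts L
def outerB (C : List Int) (m : Nat) (L : Nat) (mx l r : Int) : Int × Int × Int :=
  let k := searchB C (C.getD L 0) m (L + 1)
  if h : m < k then (mx, l, r + 1)
  else if C.getD L 0 < C.getD k 0 ∧ mx < (k : Int) - 1 - (L : Int) then
    outerB C m k ((k : Int) - 1 - (L : Int)) (L : Int) ((k : Int) - 1)
  else outerB C m k mx l r
termination_by m + 1 - L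
decreasing_by
  · have := searchB_ge C (C.getD L 0) m (L + 1); omega
  · have := searchB_ge C (C.getD L 0) m (L + 1); omega

def find_max_recovery_alt (prices : List Int) : Int × Int × Int :=
  let C := buildC prices
  outerB C (C.length - 1) 0 0 0 0

-- ===== PRECONDITION & SPEC =====
def Spec_find_max_recovery (prices : List Int) (out : Int × Int × Int) : Prop := out = find_max_recovery_alt prices
instance (prices : List Int) (out : Int × Int × Int) : Decidable (Spec_find_max_recovery prices out) := by unfold Spec_find_max_recovery; infer_instance

-- ===== CLAIM (what is proved, stated in full; the proofs are below) =====
def Claim_equal_find_max_recovery : Prop := ∀ (prices : List Int), Dom_find_max_recovery prices → Spec_find_max_recovery prices (find_max_recovery prices)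

-- ===== LEMMAS AND PROOFS =====

-- structural form of calc_growth
def grAux (past : Int) : List Int → List Int
  | [] => []
  | p :: ps => if past ≠ 0 then (p - past) :: grAux p ps else grAux p ps

theorem calc_growth_eq_aux (ps : List Int) : ∀ (acc : List Int) (past : Int),
    (ps.foldl (fun (st : List Int × Int) p =>
      (if st.2 ≠ 0 then st.1 ++ [p - st.2] else st.1, p)) (acc, past)).1
    = acc ++ grAux past ps := by
  induction ps with
  | nil => intro acc past; simp [grAux]
  | cons p ps ih =>
    intro acc past
    rw [List.foldl_cons]
    by_cases h : past = 0
    · have hstep : ((if (acc, past).2 ≠ 0 then (acc, past).1 ++ [p - (acc, past).2]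
          else (acc, past).1, p) : List Int × Int) = (acc, p) := by simp [h]
      rw [hstep, ih, grAux, if_neg (by simp [h])]
    · have hstep : ((if (acc, past).2 ≠ 0 then (acc, past).1 ++ [p - (acc, past).2]
          else (acc, past).1, p) : List Int × Int) = (acc ++ [p - past], p) := by simp [h]
      rw [hstep, ih, grAux, if_pos h]
      simp

theorem calc_growth_eq (prices : List Int) : calc_growth prices = grAux 0 prices := by
  unfold calc_growth
  simpa using calc_growth_eq_aux prices [] 0

-- structural form of A's indexed loop
def loopA' (j : Int) (st : Int × Int × Int × Int × Int) : List Int → Int × Int × Int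
  | [] => (st.2.2.2.2, st.2.1, st.2.2.1 + 1)
  | gi :: g => loopA' (j + 1) (stepA st j gi) g

theorem foldl_range_eq_loopA' (G : List Int) : ∀ (n j : Nat), G.length = j + n →
    ∀ (st : Int × Int × Int × Int × Int),
    (let r := (PySem.List.pyRange (j : Int) (G.length : Int) 1).foldl
        (fun st i => stepA st i (PySem.List.pyGetD G i 0)) st
     ((r.2.2.2.2, r.2.1, r.2.2.1 + 1) : Int × Int × Int))
    = loopA' (j : Int) st (G.drop j) := by
  intro n
  induction n with
  | zero =>
    intro j hj st
    rw [PySem.List.pyRange_one_eq_nil (by omega)]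
    rw [List.drop_of_length_le (by omega)]
    simp [loopA']
  | succ n ih =>
    intro j hj st
    have hjlt : j < G.length := by omega
    rw [PySem.List.pyRange_one_cons (by exact_mod_cast hjlt)]
    rw [List.drop_eq_getElem_cons hjlt]
    simp only [List.foldl_cons, loopA']
    have hget : PySem.List.pyGetD G (j : Int) 0 = G[j] := by simp [PySem.List.pyGetD_natCast, hjlt]
    rw [hget]
    have := ih (j + 1) (by omega) (stepA st (j : Int) G[j])
    simpa [Int.add_comm] using this

-- reference split: first position of the remaining diff list where the running sum
-- (started at s ≤ 0) reaches 0 or above; returns (steps, strictly-positive?, remainder)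
def splitSeg (s : Int) : List Int → Option (Nat × Bool × List Int)
  | [] => none
  | d :: g =>
    if 0 ≤ s + d then some (0, decide (0 < s + d), g)
    else (splitSeg (s + d) g).map (fun x => (x.1 + 1, x.2))

-- A's scan, segment by segment
theorem loopA'_split : ∀ (g : List Int) (j s l r L mx : Int), s ≤ 0 →
    loopA' j (s, l, r, L, mx) g =
      match splitSeg s g with
      | none => (mx, l, r + 1)
      | some (t, b, rest) =>
          if b = true ∧ mx < (j + (t : Int)) - (if s = 0 then j else L) then
            loopA' (j + (t : Int) + 1)
              (0, (if s = 0 then j else L), j + (t : Int), (if s = 0 then j else L),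
                (j + (t : Int)) - (if s = 0 then j else L)) rest
          else loopA' (j + (t : Int) + 1) (0, l, r, (if s = 0 then j else L), mx) rest := by
  intro g
  induction g with
  | nil => intro j s l r L mx hs; simp [loopA', splitSeg]
  | cons d g ih =>
    intro j s l r L mx hs
    simp only [loopA', stepA]
    by_cases h0 : 0 ≤ s + d
    · rw [splitSeg, if_pos h0]
      by_cases h1 : 0 < s + d
      · simp only [decide_eq_true_eq, h1, true_and, Nat.cast_zero, add_zero]
        split_ifs <;> rfl
      · have h2 : s + d = 0 := by omega
        simp only [h2, decide_eq_true_eq, lt_irrefl, false_and, if_false, Nat.cast_zero,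
          add_zero]
    · rw [splitSeg, if_neg h0]
      have h1 : ¬ 0 < s + d := by omega
      rw [if_neg h1]
      have hrec := ih (j + 1) (s + d) l r (if s = 0 then j else L) mx (by omega)
      have hne : ¬ (s + d = 0) := by omega
      simp only [if_neg hne] at hrec
      rw [hrec]
      cases hsp : splitSeg (s + d) g with
      | none => simp
      | some x =>
        obtain ⟨t, b, rest⟩ := x
        simp only [Option.map_some]
        have hcast : ((t + 1 : Nat) : Int) = (t : Int) + 1 := by push_cast; ring
        have harith : j + 1 + (t : Int) = j + ((t : Int) + 1) := by ring
        simp only [hcast, ← harith]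

-- specialisation of loopA'_split to a segment start (s = 0)
theorem loopA'_split0 (g : List Int) (j l r cl mx : Int) :
    loopA' j (0, l, r, cl, mx) g =
      match splitSeg 0 g with
      | none => (mx, l, r + 1)
      | some (t, b, rest) =>
          if b = true ∧ mx < (t : Int) then
            loopA' (j + (t : Int) + 1) (0, j, j + (t : Int), j, (t : Int)) rest
          else loopA' (j + (t : Int) + 1) (0, l, r, j, mx) rest := by
  rw [loopA'_split g j 0 l r cl mx (le_refl 0)]
  cases hsp : splitSeg 0 g with
  | none => rfl
  | some x =>
    obtain ⟨t, b, rest⟩ := x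
    have h2 : j + (t : Int) - j = (t : Int) := by ring
    simp [h2]

-- searchB finds exactly the split point of splitSeg, over the level list C
theorem search_split (G C : List Int) (m : Nat) (hm : m = G.length)
    (hCf : ∀ j, j < m → C.getD (j + 1) 0 = C.getD j 0 + G.getD j 0) :
    ∀ (n j : Nat), j + n = m → ∀ (cL : Int),
    match splitSeg (C.getD j 0 - cL) (G.drop j) with
    | none => searchB C cL m (j + 1) = m + 1
    | some (t, b, rest) =>
        searchB C cL m (j + 1) = j + t + 1 ∧ j + t + 1 ≤ m ∧
        b = decide (cL < C.getD (j + t + 1) 0) ∧ rest = G.drop (j + t + 1) := by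
  intro n
  induction n with
  | zero =>
    intro j hj cL
    have hdrop : G.drop j = [] := List.drop_of_length_le (by omega)
    rw [hdrop]
    simp only [splitSeg]
    rw [searchB, dif_neg (by omega)]
    omega
  | succ n ih =>
    intro j hj cL
    have hjlt : j < G.length := by omega
    rw [List.drop_eq_getElem_cons hjlt]
    have hgj : G[j] = G.getD j 0 := (List.getD_eq_getElem G 0 hjlt).symm
    have hlev : C.getD j 0 - cL + G[j] = C.getD (j + 1) 0 - cL := by
      rw [hgj, hCf j (by omega)]; ring
    rw [splitSeg, hlev]
    by_cases h0 : 0 ≤ C.getD (j + 1) 0 - cL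
    · rw [if_pos h0]
      refine ⟨?_, by omega, ?_, ?_⟩
      · rw [searchB, dif_neg (by omega)]
      · simp
      · simp
    · rw [if_neg h0]
      rw [searchB, dif_pos ⟨by omega, by omega⟩]
      have hrec := ih (j + 1) (by omega) cL
      cases hsp : splitSeg (C.getD (j + 1) 0 - cL) (G.drop (j + 1)) with
      | none => rw [hsp] at hrec; simpa using hrec
      | some x =>
        obtain ⟨t, b, rest⟩ := x
        rw [hsp] at hrec
        simp only [Option.map_some]
        obtain ⟨h1, h2, h3, h4⟩ := hrec
        have hidx : j + (t + 1) + 1 = j + 1 + t + 1 := by omega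
        exact ⟨by rw [hidx]; exact h1, by omega, by rw [hidx]; exact h3, by rw [hidx]; exact h4⟩

-- main correspondence: A's scan from a segment start L equals Source B's outer loop
theorem outer_corr (G C : List Int) (m : Nat) (hm : m = G.length)
    (hCf : ∀ j, j < m → C.getD (j + 1) 0 = C.getD j 0 + G.getD j 0) :
    ∀ (n L : Nat), m + 1 - L ≤ n → L ≤ m → ∀ (l r mx cl : Int),
    loopA' (L : Int) (0, l, r, cl, mx) (G.drop L) = outerB C m L mx l r := by
  intro n
  induction n with
  | zero => intro L h1 h2; omega
  | succ n ih =>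
    intro L h1 h2 l r mx cl
    have hsearch := search_split G C m hm hCf (m - L) L (by omega) (C.getD L 0)
    have hzero : C.getD L 0 - C.getD L 0 = 0 := by ring
    rw [hzero] at hsearch
    rw [loopA'_split0 (G.drop L) (L : Int) l r cl mx]
    rw [outerB]
    cases hsp : splitSeg 0 (G.drop L) with
    | none =>
      rw [hsp] at hsearch
      simp only [hsearch]
      rw [dif_pos (by omega)]
    | some x =>
      obtain ⟨t, b, rest⟩ := x
      rw [hsp] at hsearch
      obtain ⟨h1', h2', h3', h4'⟩ := hsearch
      simp only [h1']
      rw [dif_neg (by omega)]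
      subst h3'
      subst h4'
      have c3 : (L : Int) + (t : Int) + 1 = ((L + t + 1 : Nat) : Int) := by push_cast; ring
      have c4 : ((L + t + 1 : Nat) : Int) - 1 = (L : Int) + (t : Int) := by push_cast; ring
      have c5 : (L : Int) + (t : Int) - (L : Int) = (t : Int) := by ring
      simp only [decide_eq_true_eq, c4, c5]
      split_ifs with hc
      · rw [c3]
        exact ih (L + t + 1) (by omega) h2' (L : Int) ((L : Int) + (t : Int)) (t : Int) (L : Int)
      · rw [c3]
        exact ih (L + t + 1) (by omega) h2' l r mx (L : Int)

-- levels of a diff list, and buildC's characterisation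
def levs (cur : Int) : List Int → List Int
  | [] => []
  | d :: g => (cur + d) :: levs (cur + d) g

theorem buildC_eq_aux (ps : List Int) : ∀ (acc : List Int) (cur past : Int),
    (ps.foldl
      (fun (st : List Int × Int × Int) p =>
        if st.2.2 ≠ 0 then (st.1 ++ [st.2.1 + (p - st.2.2)], st.2.1 + (p - st.2.2), p)
        else (st.1, st.2.1, p))
      (acc, cur, past)).1
    = acc ++ levs cur (grAux past ps) := by
  induction ps with
  | nil => intro acc cur past; simp [grAux, levs]
  | cons p ps ih =>
    intro acc cur past
    rw [List.foldl_cons]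
    by_cases h : past = 0
    · have hstep : ((if ((acc, cur, past) : List Int × Int × Int).2.2 ≠ 0
          then ((acc, cur, past).1 ++ [(acc, cur, past).2.1 + (p - (acc, cur, past).2.2)],
            (acc, cur, past).2.1 + (p - (acc, cur, past).2.2), p)
          else ((acc, cur, past).1, (acc, cur, past).2.1, p)) : List Int × Int × Int)
          = (acc, cur, p) := by simp [h]
      rw [hstep, ih, grAux, if_neg (by simp [h])]
    · have hstep : ((if ((acc, cur, past) : List Int × Int × Int).2.2 ≠ 0
          then ((acc, cur, past).1 ++ [(acc, cur, past).2.1 + (p - (acc, cur, past).2.2)],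
            (acc, cur, past).2.1 + (p - (acc, cur, past).2.2), p)
          else ((acc, cur, past).1, (acc, cur, past).2.1, p)) : List Int × Int × Int)
          = (acc ++ [cur + (p - past)], cur + (p - past), p) := by simp [h]
      rw [hstep, ih, grAux, if_pos h, levs]
      simp

theorem buildC_eq (prices : List Int) : buildC prices = 0 :: levs 0 (grAux 0 prices) := by
  unfold buildC
  simpa using buildC_eq_aux prices [0] 0 0

theorem levs_length (g : List Int) : ∀ cur, (levs cur g).length = g.length := by
  induction g with
  | nil => intro cur; simp [levs]
  | cons d g ih => intro cur; simp [levs, ih]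

theorem levs_getD (g : List Int) : ∀ (cur : Int) (j : Nat), j < g.length →
    (cur :: levs cur g).getD (j + 1) 0 = (cur :: levs cur g).getD j 0 + g.getD j 0 := by
  induction g with
  | nil => intro cur j hj; simp at hj
  | cons d g ih =>
    intro cur j hj
    cases j with
    | zero => simp [levs]
    | succ j =>
      have := ih (cur + d) j (by simpa using hj)
      simpa [levs] using this

-- ===== VERDICT (by name: the statement is the Claim_ definition above) =====
theorem find_max_recovery_spec : Claim_equal_find_max_recovery := by
  intro prices _
  unfold Spec_find_max_recovery find_max_recovery find_max_recovery_alt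
  have hA := foldl_range_eq_loopA' (calc_growth prices) (calc_growth prices).length 0
    (by omega) (0, 0, 0, 0, 0)
  simp only [Nat.cast_zero, List.drop_zero] at hA
  rw [hA, calc_growth_eq]
  set G := grAux 0 prices with hG
  have hC := buildC_eq prices
  show loopA' 0 (0, 0, 0, 0, 0) G = outerB (buildC prices) ((buildC prices).length - 1) 0 0 0 0
  rw [hC]
  have hlen : (0 :: levs 0 G).length - 1 = G.length := by simp [levs_length]
  rw [hlen]
  have := outer_corr G (0 :: levs 0 G) G.length rfl
    (fun j hj => levs_getD G 0 j hj) (G.length + 1) 0 (by omega) (by omega) 0 0 0 0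
  simpa using this
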